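-- pv_equiv track=rewrite | github.com/AbhisekhNayek/POTD-GFG | Row with minimum number of 1's.py | minRow
-- ===== SOURCE A (Python) =====
-- def minRow(n,m,a):
--     #code here
--     g = []
--     for i in a:
--         g.append(sum(i))
--     p = min(g)
--     r = []
--     for j in range(0,len(g)):
--         if p == g[j]:
--             r.append(j+1)
--     return r[0]
-- ===== SOURCE B (Python) =====
-- def minRow(n, m, a):
--     # single pass: track (1-indexed position, sum) of the best row so far;
--     # strict '<' keeps the first row on ties
--     best = None
--     k = 0
--     for row in a:
--         s = sum(row)
--         k += 1
--         if best is None or s < best[1]: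
--             best = (k, s)
--     return best[0]
-- ===== Notes on version B (the rewrite author's own statement) =====
-- stated objective: simpler
-- what changed: Replaced A's three phases (build full list of row sums, min() over it, then rescan the sum list for the first index matching the minimum) with a single pass that keeps the running minimum sum and its first 1-indexed position.
import Mathlib
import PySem

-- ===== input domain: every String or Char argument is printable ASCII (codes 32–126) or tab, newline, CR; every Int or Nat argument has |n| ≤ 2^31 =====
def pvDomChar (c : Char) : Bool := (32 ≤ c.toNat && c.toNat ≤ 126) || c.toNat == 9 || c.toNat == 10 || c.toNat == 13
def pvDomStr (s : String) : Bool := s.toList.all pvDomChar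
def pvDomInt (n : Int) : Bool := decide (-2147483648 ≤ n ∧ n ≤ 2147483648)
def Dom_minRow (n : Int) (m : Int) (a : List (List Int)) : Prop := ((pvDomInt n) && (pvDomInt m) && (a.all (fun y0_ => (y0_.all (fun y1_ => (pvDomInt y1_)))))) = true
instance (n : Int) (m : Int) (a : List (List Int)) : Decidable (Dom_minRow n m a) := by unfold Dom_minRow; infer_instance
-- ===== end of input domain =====

-- B replaces A's three phases (list of row sums, min(), rescan for first match) with one
-- pass keeping the running minimum sum and its first 1-indexed position (objective: simpler).

-- ===== PORT A =====
def minRow (n : Int) (m : Int) (a : List (List Int)) : Int :=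
  -- g = []; for i in a: g.append(sum(i))
  let g : List Int := a.foldl (fun acc i => acc ++ [i.foldl (· + ·) 0]) []
  -- p = min(g)   (raises ValueError on empty g — excluded by Pre_)
  match PySem.List.min? g (fun y => y) with
  | none => 0
  | some p =>
    -- r = []; for j in range(0, len(g)): if p == g[j]: r.append(j+1)
    let r : List Int := (PySem.List.pyRange 0 (g.length : Int) 1).foldl
      (fun acc j => if p = PySem.List.pyGetD g j 0 then acc ++ [j + 1] else acc) []
    -- return r[0]  (in range under Pre_: p occurs in g)
    PySem.List.pyGetD r 0 0

-- ===== PORT B =====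
-- the for-loop of Source B: state = (best : Option (pos, sum), k)
def minRowAltGo (st : Option (Int × Int)) (k : Int) (rows : List (List Int)) : Option (Int × Int) :=
  match rows with
  | [] => st
  | row :: rest =>
    let s := row.foldl (· + ·) 0
    let k' := k + 1
    let st' := match st with
      | none => some (k', s)
      | some (bi, bs) => if s < bs then some (k', s) else some (bi, bs)
    minRowAltGo st' k' rest

def minRow_alt (n : Int) (m : Int) (a : List (List Int)) : Int :=
  match minRowAltGo none 0 a with
  | some (bi, _) => bi
  | none => 0  -- Python's best[0] raises TypeError here; excluded by Pre_

-- ===== PRECONDITION & SPEC =====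
-- A raises ValueError (min of an empty sequence) on a = []; Pre_ excludes exactly that.
def Pre_minRow (n : Int) (m : Int) (a : List (List Int)) : Prop := a ≠ []
instance (n : Int) (m : Int) (a : List (List Int)) : Decidable (Pre_minRow n m a) := by unfold Pre_minRow; infer_instance
def pvWitness_minRow : Int × Int × List (List Int) := (2, 2, [[1, 1], [0, 1]])

def Spec_minRow (n : Int) (m : Int) (a : List (List Int)) (out : Int) : Prop := out = minRow_alt n m a
instance (n : Int) (m : Int) (a : List (List Int)) (out : Int) : Decidable (Spec_minRow n m a out) := by unfold Spec_minRow; infer_instance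

-- ===== CLAIM (what is proved, stated in full; the proofs are below) =====
def Claim_equal_minRow : Prop := ∀ (n : Int) (m : Int) (a : List (List Int)), Dom_minRow n m a → Pre_minRow n m a → Spec_minRow n m a (minRow n m a)

-- ===== LEMMAS AND PROOFS =====

-- sum of a row, as both ports compute it
def sumI (r : List Int) : Int := r.foldl (· + ·) 0

-- the list of 1-indexed (offset) match positions A's scan produces
def matchesM (l : List Int) (p off : Int) : List Int :=
  match l with
  | [] => []
  | x :: t => (if p = x then [off + 1] else []) ++ matchesM t p (off + 1)

theorem foldl_min_le (l : List Int) : ∀ b : Int, l.foldl min b ≤ b := by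
  induction l with
  | nil => intro b; simp
  | cons x t ih =>
    intro b
    calc (x :: t).foldl min b = t.foldl min (min b x) := by simp
    _ ≤ min b x := ih _
    _ ≤ b := min_le_left _ _

theorem scan_go (l : List Int) (p : Int) : ∀ (off : Int) (acc : List Int),
    (List.range l.length).foldl
      (fun acc j => if p = l.getD j 0 then acc ++ [off + (j : Int) + 1] else acc) acc
    = acc ++ matchesM l p off := by
  induction l with
  | nil => intro off acc; simp [matchesM]
  | cons x t ih =>
    intro off acc
    rw [List.length_cons, List.range_succ_eq_map, List.foldl_cons, List.foldl_map]
    have h1 : (fun (acc : List Int) (j : Nat) =>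
        if p = (x :: t).getD (Nat.succ j) 0 then acc ++ [off + (Nat.succ j : Int) + 1] else acc)
        = (fun (acc : List Int) (j : Nat) =>
        if p = t.getD j 0 then acc ++ [(off + 1) + (j : Int) + 1] else acc) := by
      funext acc j
      have : ((Nat.succ j : Nat) : Int) = (j : Int) + 1 := by push_cast; ring
      simp [this]
      ring_nf
    rw [h1, ih (off + 1)]
    by_cases hpx : p = x <;> simp [matchesM, hpx]

theorem matchesM_head (l : List Int) (p : Int) : ∀ off : Int, p ∈ l →
    (matchesM l p off).getD 0 0 = off + (l.idxOf p : Int) + 1 := by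
  induction l with
  | nil => intro off h; simp at h
  | cons x t ih =>
    intro off h
    by_cases hpx : p = x
    · simp [matchesM, hpx, List.idxOf_cons]
    · have hx : (x == p) = false := by simp [Ne.symm hpx]
      have hpt : p ∈ t := by rcases List.mem_cons.mp h with h1 | h1; exact absurd h1.symm (Ne.symm hpx); exact h1
      show ((if p = x then [off + 1] else []) ++ matchesM t p (off + 1)).getD 0 0
        = off + (((x :: t).idxOf p : Nat) : Int) + 1
      rw [if_neg hpx, List.nil_append, ih (off + 1) hpt, List.idxOf_cons, hx]
      simp only [cond_false]
      push_cast
      ring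

theorem altGo_char (rows : List (List Int)) : ∀ (bi bs k : Int),
    minRowAltGo (some (bi, bs)) k rows =
      some (if (rows.map sumI).foldl min bs < bs
            then k + 1 + (((rows.map sumI).idxOf ((rows.map sumI).foldl min bs)) : Int)
            else bi,
            (rows.map sumI).foldl min bs) := by
  induction rows with
  | nil => intro bi bs k; simp [minRowAltGo]
  | cons row rest ih =>
    intro bi bs k
    have hs : (List.foldl (fun x1 x2 => x1 + x2) 0 row : Int) = sumI row := rfl
    rw [minRowAltGo]
    simp only [hs, List.map_cons, List.foldl_cons]
    have hMles : ∀ b : Int, (rest.map sumI).foldl min b ≤ b := fun b => foldl_min_le _ b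
    by_cases hlt : sumI row < bs
    · rw [if_pos hlt, ih]
      have hmin : min bs (sumI row) = sumI row := min_eq_right (le_of_lt hlt)
      rw [hmin]
      have hMlt : (rest.map sumI).foldl min (sumI row) < bs :=
        lt_of_le_of_lt (hMles _) hlt
      rw [if_pos hMlt]
      by_cases hcase : (rest.map sumI).foldl min (sumI row) < sumI row
      · have hne : (sumI row == (rest.map sumI).foldl min (sumI row)) = false := by
          simp; exact ne_of_gt hcase
        rw [if_pos hcase, List.idxOf_cons, hne]
        simp only [cond_false]
        congr 1
        push_cast
        ring
      · have heq : (rest.map sumI).foldl min (sumI row) = sumI row :=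
          le_antisymm (hMles _) (not_lt.mp hcase)
        have hbeq : (sumI row == (rest.map sumI).foldl min (sumI row)) = true := by simp [heq]
        rw [if_neg hcase, List.idxOf_cons, hbeq]
        simp only [cond_true]
        norm_num
    · rw [if_neg hlt, ih]
      have hmin : min bs (sumI row) = bs := min_eq_left (not_lt.mp hlt)
      rw [hmin]
      by_cases hcase : (rest.map sumI).foldl min bs < bs
      · have hlt2 : (rest.map sumI).foldl min bs < sumI row :=
          lt_of_lt_of_le hcase (not_lt.mp hlt)
        have hne : (sumI row == (rest.map sumI).foldl min bs) = false := by
          simp; exact ne_of_gt hlt2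
        rw [if_pos hcase, if_pos hcase, List.idxOf_cons, hne]
        simp only [cond_false]
        congr 1
        push_cast
        ring
      · rw [if_neg hcase, if_neg hcase]

-- ===== VERDICT (by name: the statement is the Claim_ definition above) =====
theorem minRow_spec : Claim_equal_minRow := by
  intro n m a _ hpre
  unfold Spec_minRow
  match a with
  | [] => exact absurd rfl hpre
  | row0 :: rows =>
    -- A side
    unfold minRow
    rw [PySem.List.foldl_append_singleton_eq_map]
    simp only [List.nil_append]
    have hg : (row0 :: rows).map (fun i => i.foldl (· + ·) 0) = sumI row0 :: rows.map sumI := by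
      simp [sumI]
    rw [hg, PySem.List.min?_id_cons]
    set g : List Int := sumI row0 :: rows.map sumI with hgdef
    set p : Int := (rows.map sumI).foldl min (sumI row0) with hpdef
    have hpmem : p ∈ g := PySem.List.min?_mem (by rw [PySem.List.min?_id_cons])
    change PySem.List.pyGetD ((PySem.List.pyRange 0 (g.length : Int) 1).foldl
      (fun acc j => if p = PySem.List.pyGetD g j 0 then acc ++ [j + 1] else acc) []) 0 0
      = minRow_alt n m (row0 :: rows)
    -- the scan
    have hlen : ((g.length : Int)) = ((g.length : Nat) : Int) := rfl
    have hscan : (PySem.List.pyRange 0 (g.length : Int) 1).foldl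
        (fun acc j => if p = PySem.List.pyGetD g j 0 then acc ++ [j + 1] else acc) []
        = matchesM g p 0 := by
      rw [hlen, PySem.List.pyRange_zero_nat, List.foldl_map]
      have h1 : (fun (acc : List Int) (k : Nat) =>
          if p = PySem.List.pyGetD g (k : Int) 0 then acc ++ [(k : Int) + 1] else acc)
          = (fun (acc : List Int) (j : Nat) =>
          if p = g.getD j 0 then acc ++ [(0 : Int) + (j : Int) + 1] else acc) := by
        funext acc k
        rw [PySem.List.pyGetD_natCast]
        norm_num
      rw [h1, scan_go]
      simp
    rw [hscan, PySem.List.pyGetD_zero, matchesM_head g p 0 hpmem]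
    -- B side
    unfold minRow_alt minRowAltGo
    simp only
    rw [altGo_char]
    have hs0 : (List.foldl (fun x1 x2 => x1 + x2) 0 row0 : Int) = sumI row0 := rfl
    rw [hs0, ← hpdef]
    have hle : p ≤ sumI row0 := hpdef ▸ foldl_min_le _ _
    by_cases hc : p < sumI row0
    · have hne : (sumI row0 == p) = false := by simp; exact ne_of_gt hc
      rw [hgdef, List.idxOf_cons, hne, if_pos hc]
      simp only [cond_false]
      push_cast
      ring
    · have heq : p = sumI row0 := le_antisymm hle (not_lt.mp hc)
      have hbeq : (sumI row0 == p) = true := by simp [heq]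
      rw [hgdef, List.idxOf_cons, hbeq, if_neg hc]
      simp only [cond_true]
      norm_num
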